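-- pv_equiv track=rewrite | github.com/jameswmccarty/AdventOfCode2022 | day18.py | unmatched2
-- ===== SOURCE A (Python) =====
-- def unmatched2(check_set,cubes):
-- 	deltas = [(1,0,0),(-1,0,0),(0,1,0),(0,-1,0),(0,0,1),(0,0,-1)]
-- 	total_unmatched = 0
-- 	for cube in check_set:
-- 		x,y,z = cube
-- 		adjacent = 0
-- 		for dx,dy,dz in deltas:
-- 			if (x+dx,y+dy,z+dz) in cubes:
-- 				adjacent += 1
-- 		if adjacent != 0:
-- 			total_unmatched += adjacent
-- 	return total_unmatched
-- ===== SOURCE B (Python) =====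
-- def unmatched2(check_set, cubes):
-- 	# sort-then-merge: sort all six-shifted coordinates and the cubes, then one
-- 	# two-pointer sweep counts shifted coordinates that are present among cubes
-- 	deltas = [(1, 0, 0), (-1, 0, 0), (0, 1, 0), (0, -1, 0), (0, 0, 1), (0, 0, -1)]
-- 	shifted = sorted((x + dx, y + dy, z + dz) for (x, y, z) in check_set for (dx, dy, dz) in deltas)
-- 	targets = sorted(cubes)
-- 	total = 0
-- 	i = 0
-- 	j = 0
-- 	while i < len(shifted) and j < len(targets):
-- 		if shifted[i] < targets[j]:
-- 			i += 1
-- 		elif shifted[i] > targets[j]: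
-- 			j += 1
-- 		else:
-- 			total += 1
-- 			i += 1
-- 	return total
-- ===== Notes on version B (the rewrite author's own statement) =====
-- stated objective: alternative
-- what changed: B replaces A's nested scan (per cube, probe six neighbours by linear list membership, with a redundant nonzero guard) by sort-then-merge: it sorts the list of all six-shifted coordinates and the cubes list, then a single two-pointer sweep counts shifted coordinates present among the cubes.
import Mathlib
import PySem

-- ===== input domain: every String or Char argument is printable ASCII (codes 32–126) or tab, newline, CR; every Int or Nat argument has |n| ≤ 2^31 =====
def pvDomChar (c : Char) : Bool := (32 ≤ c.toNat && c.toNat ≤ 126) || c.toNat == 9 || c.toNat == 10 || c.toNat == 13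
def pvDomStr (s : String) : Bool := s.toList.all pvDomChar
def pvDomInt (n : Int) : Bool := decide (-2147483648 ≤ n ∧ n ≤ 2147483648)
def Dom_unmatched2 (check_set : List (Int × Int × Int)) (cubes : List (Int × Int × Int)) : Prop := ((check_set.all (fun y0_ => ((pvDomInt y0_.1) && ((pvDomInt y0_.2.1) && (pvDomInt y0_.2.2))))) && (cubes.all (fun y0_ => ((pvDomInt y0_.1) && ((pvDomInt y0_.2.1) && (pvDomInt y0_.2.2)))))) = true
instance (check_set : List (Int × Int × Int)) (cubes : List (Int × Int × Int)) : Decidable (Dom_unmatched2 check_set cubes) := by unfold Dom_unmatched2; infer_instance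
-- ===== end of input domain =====

-- B replaces A's nested membership scan by sort-then-merge: sort the six-shifted
-- coordinates and the cubes, then a single two-pointer sweep counts the matches
-- (objective: alternative algorithm; not measured faster on the benchmark inputs).

-- ===== PORT A =====
def unmatched2 (check_set : List (Int × Int × Int)) (cubes : List (Int × Int × Int)) : Int :=
  let deltas : List (Int × Int × Int) := [(1,0,0),(-1,0,0),(0,1,0),(0,-1,0),(0,0,1),(0,0,-1)]
  check_set.foldl (fun total_unmatched cube =>
    let x := cube.1
    let y := cube.2.1
    let z := cube.2.2
    let adjacent : Int := deltas.foldl (fun adjacent d =>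
      if (x + d.1, y + d.2.1, z + d.2.2) ∈ cubes then adjacent + 1 else adjacent) 0
    if adjacent ≠ 0 then total_unmatched + adjacent else total_unmatched) 0

-- ===== PORT B =====
-- Python tuple '<' on int triples, lexicographic
def pvLt (a b : Int × Int × Int) : Bool :=
  decide (a.1 < b.1 ∨ (a.1 = b.1 ∧ (a.2.1 < b.2.1 ∨ (a.2.1 = b.2.1 ∧ a.2.2 < b.2.2))))

-- Source B's while loop over indices i, j: transliterated as recursion on the two
-- list suffixes (i/j advance = dropping the head of the respective suffix)
def pvSweep : List (Int × Int × Int) → List (Int × Int × Int) → Int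
  | [], _ => 0
  | _ :: _, [] => 0
  | x :: xs, y :: ys =>
    if pvLt x y then pvSweep xs (y :: ys)
    else if pvLt y x then pvSweep (x :: xs) ys
    else 1 + pvSweep xs (y :: ys)
termination_by xs ys => xs.length + ys.length
decreasing_by all_goals simp

-- Source B's sorted(...) ported as the standard library sort with the same order
def unmatched2_alt (check_set : List (Int × Int × Int)) (cubes : List (Int × Int × Int)) : Int :=
  let deltas : List (Int × Int × Int) := [(1,0,0),(-1,0,0),(0,1,0),(0,-1,0),(0,0,1),(0,0,-1)]
  let shifted := (check_set.flatMap (fun c =>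
    deltas.map (fun d => (c.1 + d.1, c.2.1 + d.2.1, c.2.2 + d.2.2)))).mergeSort
      (fun a b => !pvLt b a)
  let targets := cubes.mergeSort (fun a b => !pvLt b a)
  pvSweep shifted targets

-- ===== PRECONDITION & SPEC =====
def Spec_unmatched2 (check_set : List (Int × Int × Int)) (cubes : List (Int × Int × Int)) (out : Int) : Prop := out = unmatched2_alt check_set cubes
instance (check_set : List (Int × Int × Int)) (cubes : List (Int × Int × Int)) (out : Int) : Decidable (Spec_unmatched2 check_set cubes out) := by unfold Spec_unmatched2; infer_instance

-- ===== CLAIM (what is proved, stated in full; the proofs are below) =====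
def Claim_equal_unmatched2 : Prop := ∀ (check_set : List (Int × Int × Int)) (cubes : List (Int × Int × Int)), Dom_unmatched2 check_set cubes → Spec_unmatched2 check_set cubes (unmatched2 check_set cubes)

-- ===== LEMMAS AND PROOFS =====

-- indicator of membership in a list
def pvInd (l : List (Int × Int × Int)) (v : Int × Int × Int) : Int := if v ∈ l then 1 else 0

theorem pvLt_irrefl (a : Int × Int × Int) : pvLt a a = false := by
  obtain ⟨a1, a2, a3⟩ := a; simp [pvLt]

theorem pvLt_eq_of_not (a b : Int × Int × Int)
    (h1 : pvLt a b = false) (h2 : pvLt b a = false) : a = b := by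
  obtain ⟨a1, a2, a3⟩ := a; obtain ⟨b1, b2, b3⟩ := b
  simp [pvLt] at h1 h2
  simp only [Prod.mk.injEq]
  omega

-- a guarded accumulating fold is the sum of the guarded terms
theorem foldl_if_addf {α : Type} (xs : List α) (p : α → Prop) [DecidablePred p]
    (w : α → Int) (init : Int) :
    xs.foldl (fun a x => if p x then a + w x else a) init
      = init + (xs.map (fun x => if p x then w x else 0)).sum := by
  induction xs generalizing init with
  | nil => simp
  | cons x xs ih => by_cases h : p x <;> simp [h, ih, add_assoc]

-- the two-pointer sweep over sorted lists counts, per element of xs, presence in ys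
theorem pvSweep_eq (xs ys : List (Int × Int × Int))
    (hxs : List.Pairwise (fun a b => (!pvLt b a) = true) xs)
    (hys : List.Pairwise (fun a b => (!pvLt b a) = true) ys) :
    pvSweep xs ys = (xs.map (pvInd ys)).sum := by
  induction xs, ys using pvSweep.induct with
  | case1 ys => rw [pvSweep]; simp
  | case2 x xs =>
    rw [pvSweep]
    rw [List.sum_eq_zero]
    intro v hv
    rcases List.mem_map.mp hv with ⟨a, _, rfl⟩
    simp [pvInd]
  | case3 x xs y ys hlt ih =>
    rw [pvSweep]
    simp only [hlt, if_true]
    have hxnot : x ∉ y :: ys := by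
      intro hx
      rcases List.mem_cons.mp hx with rfl | hx'
      · rw [pvLt_irrefl] at hlt; exact absurd hlt (by simp)
      · have h := (List.pairwise_cons.mp hys).1 x hx'
        simp only [Bool.not_eq_eq_eq_not, Bool.not_true] at h
        rw [h] at hlt; exact absurd hlt (by simp)
    rw [ih hxs.tail hys]
    simp [pvInd, hxnot]
  | case4 x xs y ys hlt1 hlt2 ih =>
    rw [pvSweep]
    simp only [hlt1, hlt2, if_true, Bool.false_eq_true, if_false]
    rw [ih hxs hys.tail]
    have hne : ∀ v ∈ x :: xs, v ≠ y := by
      intro v hv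
      rcases List.mem_cons.mp hv with rfl | hv'
      · intro h; rw [h, pvLt_irrefl] at hlt2; exact absurd hlt2 (by simp)
      · have h := (List.pairwise_cons.mp hxs).1 v hv'
        simp only [Bool.not_eq_eq_eq_not, Bool.not_true] at h
        intro he
        rw [he] at h
        rw [h] at hlt2; exact absurd hlt2 (by simp)
    apply congrArg List.sum
    apply List.map_congr_left
    intro v hv
    simp [pvInd, hne v hv]
  | case5 x xs y ys hlt1 hlt2 ih =>
    rw [pvSweep]
    simp only [hlt1, hlt2, Bool.false_eq_true, if_false]
    have hxy : x = y := pvLt_eq_of_not x y (by simpa using hlt1) (by simpa using hlt2)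
    rw [ih hxs.tail hys]
    subst hxy
    simp [pvInd]

-- sorting preserves asymmetry/transitivity facts needed for Pairwise of mergeSort
theorem pvLe_trans (a b c : Int × Int × Int)
    (h1 : (!pvLt b a) = true) (h2 : (!pvLt c b) = true) : (!pvLt c a) = true := by
  obtain ⟨a1, a2, a3⟩ := a; obtain ⟨b1, b2, b3⟩ := b; obtain ⟨c1, c2, c3⟩ := c
  simp [pvLt] at h1 h2 ⊢
  omega

theorem pvLe_total (a b : Int × Int × Int) : ((!pvLt b a) || (!pvLt a b)) = true := by
  obtain ⟨a1, a2, a3⟩ := a; obtain ⟨b1, b2, b3⟩ := b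
  simp [pvLt]
  omega

-- summing f over a flatMap is summing the inner sums
theorem sum_map_flatMap {α β : Type} (l : List α) (g : α → List β) (f : β → Int) :
    ((l.flatMap g).map f).sum = (l.map (fun a => ((g a).map f).sum)).sum := by
  induction l with
  | nil => simp
  | cons a l ih => simp [List.flatMap_cons, ih]

-- A equals the sum over check_set of the six-neighbour indicator sums
theorem A_eq (cs cubes : List (Int × Int × Int)) :
    unmatched2 cs cubes
      = (cs.map (fun c =>
          ([((1:Int),(0:Int),(0:Int)),(-1,0,0),(0,1,0),(0,-1,0),(0,0,1),(0,0,-1)].map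
            (fun d => pvInd cubes (c.1 + d.1, c.2.1 + d.2.1, c.2.2 + d.2.2))).sum)).sum := by
  simp only [unmatched2]
  have hstep : (fun (total_unmatched : Int) (cube : Int × Int × Int) =>
      let x := cube.1
      let y := cube.2.1
      let z := cube.2.2
      let adjacent : Int := [((1:Int),(0:Int),(0:Int)),(-1,0,0),(0,1,0),(0,-1,0),(0,0,1),(0,0,-1)].foldl
        (fun adjacent d => if (x + d.1, y + d.2.1, z + d.2.2) ∈ cubes then adjacent + 1 else adjacent) 0
      if adjacent ≠ 0 then total_unmatched + adjacent else total_unmatched)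
      = (fun (total : Int) (c : Int × Int × Int) =>
          total + ([((1:Int),(0:Int),(0:Int)),(-1,0,0),(0,1,0),(0,-1,0),(0,0,1),(0,0,-1)].map
            (fun d => pvInd cubes (c.1 + d.1, c.2.1 + d.2.1, c.2.2 + d.2.2))).sum) := by
    funext total c
    simp only []
    rw [foldl_if_addf _ (fun d : Int × Int × Int => (c.1 + d.1, c.2.1 + d.2.1, c.2.2 + d.2.2) ∈ cubes) (fun _ => (1:Int)) 0]
    have hm : ([((1:Int),(0:Int),(0:Int)),(-1,0,0),(0,1,0),(0,-1,0),(0,0,1),(0,0,-1)].map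
        (fun d : Int × Int × Int => if (c.1 + d.1, c.2.1 + d.2.1, c.2.2 + d.2.2) ∈ cubes then (1:Int) else 0))
        = ([((1:Int),(0:Int),(0:Int)),(-1,0,0),(0,1,0),(0,-1,0),(0,0,1),(0,0,-1)].map
            (fun d => pvInd cubes (c.1 + d.1, c.2.1 + d.2.1, c.2.2 + d.2.2))) := by
      apply List.map_congr_left; intro d _; simp [pvInd]
    rw [zero_add, hm]
    by_cases h : ([((1:Int),(0:Int),(0:Int)),(-1,0,0),(0,1,0),(0,-1,0),(0,0,1),(0,0,-1)].map
        (fun d => pvInd cubes (c.1 + d.1, c.2.1 + d.2.1, c.2.2 + d.2.2))).sum = 0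
    · simp
    · simp only [ne_eq, h, not_false_eq_true, if_true]
  rw [hstep, PySem.List.foldl_add, zero_add]

-- B equals the same double sum
theorem B_eq (cs cubes : List (Int × Int × Int)) :
    unmatched2_alt cs cubes
      = (cs.map (fun c =>
          ([((1:Int),(0:Int),(0:Int)),(-1,0,0),(0,1,0),(0,-1,0),(0,0,1),(0,0,-1)].map
            (fun d => pvInd cubes (c.1 + d.1, c.2.1 + d.2.1, c.2.2 + d.2.2))).sum)).sum := by
  unfold unmatched2_alt
  simp only []
  rw [pvSweep_eq _ _ (List.pairwise_mergeSort pvLe_trans pvLe_total _)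
        (List.pairwise_mergeSort pvLe_trans pvLe_total _)]
  have hind : pvInd (cubes.mergeSort (fun a b => !pvLt b a)) = pvInd cubes := by
    funext v
    simp [pvInd, (List.mergeSort_perm cubes (fun a b => !pvLt b a)).mem_iff]
  rw [hind]
  rw [((List.mergeSort_perm _ (fun a b => !pvLt b a)).map (pvInd cubes)).sum_eq]
  rw [sum_map_flatMap]
  apply congrArg List.sum
  apply List.map_congr_left
  intro c _
  rw [List.map_map]
  rfl

-- ===== VERDICT (by name: the statement is the Claim_ definition above) =====
theorem unmatched2_spec : Claim_equal_unmatched2 := by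
  intro cs cubes _
  unfold Spec_unmatched2
  rw [A_eq, B_eq]
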